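-- pv_equiv track=rewrite | github.com/weih201/code-repos | python repo/Mapreduce/multiply_back.py | prescan
-- ===== SOURCE A (Python) =====
-- def prescan(inputdata):
--     max_index = {"a": [-1, -1], "b": [-1, -1]}
--
--     for elem in inputdata:
--         if elem[0]=="a":
--             if elem[1]>max_index["a"][0]:
--                 max_index["a"][0]=elem[1]
--             if elem[2]>max_index["a"][1]:
--                 max_index["a"][1]=elem[2]
--
--         if elem[0]=="b":
--             if elem[1]>max_index["b"][0]:
--                 max_index["b"][0]=elem[1]
--             if elem[2]>max_index["b"][1]:
--                 max_index["b"][1]=elem[2]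
--     return max_index
-- ===== SOURCE B (Python) =====
-- def prescan(inputdata):
--     def mx(key, i):
--         return max([-1] + [e[i] for e in inputdata if e[0] == key])
--     return {"a": [mx("a", 1), mx("a", 2)], "b": [mx("b", 1), mx("b", 2)]}
-- ===== Notes on version B (the rewrite author's own statement) =====
-- stated objective: simpler
-- what changed: Replaces the single interleaved accumulator loop over a mutated dict with four independent filtered max reductions (one per key/field), seeded with -1.
import Mathlib
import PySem

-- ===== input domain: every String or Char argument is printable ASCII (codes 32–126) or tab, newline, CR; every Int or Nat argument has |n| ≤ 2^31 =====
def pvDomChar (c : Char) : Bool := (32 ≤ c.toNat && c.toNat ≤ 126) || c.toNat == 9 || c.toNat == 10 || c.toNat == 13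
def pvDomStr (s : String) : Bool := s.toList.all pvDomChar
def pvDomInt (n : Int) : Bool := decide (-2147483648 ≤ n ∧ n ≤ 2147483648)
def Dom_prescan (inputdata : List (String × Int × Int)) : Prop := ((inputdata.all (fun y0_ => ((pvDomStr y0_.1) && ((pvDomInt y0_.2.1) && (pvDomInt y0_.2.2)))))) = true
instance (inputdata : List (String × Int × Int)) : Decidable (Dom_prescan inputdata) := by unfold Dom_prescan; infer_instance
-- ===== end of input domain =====

-- B computes each of the four maxima by an independent filtered reduction instead of A's
-- single interleaved accumulator pass; equal return values, objective: simpler.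

-- ===== PORT A =====
-- A's dict {"a":[a0,a1],"b":[b0,b1]} with fixed keys is carried as the 4-tuple (a0,a1,b0,b1),
-- updated exactly as A's loop body updates the dict entries (branches in the same order).
def prescanStep (m : Int × Int × Int × Int) (elem : String × Int × Int) : Int × Int × Int × Int :=
  let m := if elem.1 == "a" then
      (if elem.2.1 > m.1 then elem.2.1 else m.1,
       if elem.2.2 > m.2.1 then elem.2.2 else m.2.1,
       m.2.2.1, m.2.2.2)
    else m
  if elem.1 == "b" then
      (m.1, m.2.1,
       if elem.2.1 > m.2.2.1 then elem.2.1 else m.2.2.1,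
       if elem.2.2 > m.2.2.2 then elem.2.2 else m.2.2.2)
    else m

def prescan (inputdata : List (String × Int × Int)) : List (String × List Int) :=
  let st := inputdata.foldl prescanStep (-1, -1, -1, -1)
  [("a", [st.1, st.2.1]), ("b", [st.2.2.1, st.2.2.2])]

-- ===== PORT B =====
-- mx key i = max([-1] + [e[i] for e in inputdata if e[0]==key])  (Python max over a nonempty list)
def prescanMx (inputdata : List (String × Int × Int)) (key : String) (f : String × Int × Int → Int) : Int :=
  ((inputdata.filter (fun e => e.1 == key)).map f).foldl max (-1)

def prescan_alt (inputdata : List (String × Int × Int)) : List (String × List Int) :=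
  [("a", [prescanMx inputdata "a" (fun e => e.2.1), prescanMx inputdata "a" (fun e => e.2.2)]),
   ("b", [prescanMx inputdata "b" (fun e => e.2.1), prescanMx inputdata "b" (fun e => e.2.2)])]

-- ===== PRECONDITION & SPEC =====
def Spec_prescan (inputdata : List (String × Int × Int)) (out : List (String × List Int)) : Prop := out = prescan_alt inputdata
instance (inputdata : List (String × Int × Int)) (out : List (String × List Int)) : Decidable (Spec_prescan inputdata out) := by unfold Spec_prescan; infer_instance

-- ===== CLAIM (what is proved, stated in full; the proofs are below) =====
def Claim_equal_prescan : Prop := ∀ (inputdata : List (String × Int × Int)), Dom_prescan inputdata → Spec_prescan inputdata (prescan inputdata)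

-- ===== LEMMAS AND PROOFS =====
theorem prescan_foldl (l : List (String × Int × Int)) (a0 a1 b0 b1 : Int) :
    l.foldl prescanStep (a0, a1, b0, b1) =
      (((l.filter (fun e => e.1 == "a")).map (fun e => e.2.1)).foldl max a0,
       ((l.filter (fun e => e.1 == "a")).map (fun e => e.2.2)).foldl max a1,
       ((l.filter (fun e => e.1 == "b")).map (fun e => e.2.1)).foldl max b0,
       ((l.filter (fun e => e.1 == "b")).map (fun e => e.2.2)).foldl max b1) := by
  induction l generalizing a0 a1 b0 b1 with
  | nil => rfl
  | cons e t ih =>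
    have hmax : ∀ m x : Int, (if x > m then x else m) = max m x := by
      intro m x; split_ifs <;> omega
    simp only [List.foldl_cons, List.filter_cons]
    by_cases ha : e.1 = "a" <;> by_cases hb : e.1 = "b" <;>
      simp_all [prescanStep, hmax, List.foldl_cons]

-- ===== VERDICT (by name: the statement is the Claim_ definition above) =====
theorem prescan_spec : Claim_equal_prescan := by
  intro inputdata _
  unfold Spec_prescan prescan prescan_alt prescanMx
  rw [prescan_foldl]
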